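-- pv_equiv track=rewrite | github.com/mohammadfaiizan/ProjectI | DSA/Problem/Graph/06_Minimum_Spanning_Tree_MST/Second_Minimum_Spanning_Tree.py | _enumerate_all_spanning_trees
-- ===== SOURCE A (Python) =====
-- from typing import List, Tuple, Optional
--
-- def _enumerate_all_spanning_trees(n: int, edges: List[List[int]]) -> List[Tuple[int, List]]:
--     """Enumerate all spanning trees (exponential - for small graphs only)"""
--     from itertools import combinations
--
--     all_trees = []
--
--     # Try all combinations of n-1 edges
--     for edge_combination in combinations(edges, n - 1):
--         uf = UnionFind(n)
--         weight = 0
--         valid = True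
--
--         for u, v, w in edge_combination:
--             if not uf.union(u, v):
--                 valid = False
--                 break
--             weight += w
--
--         if valid and uf.components == 1:
--             all_trees.append((weight, list(edge_combination)))
--
--     return all_trees
--
-- class UnionFind:
--     """Union-Find with undo operation support"""
--
--     def __init__(self, n: int):
--         self.parent = list(range(n))
--         self.rank = [0] * n
--         self.components = n
--         self.history = []
--
--     def find(self, x: int) -> int:
--         if self.parent[x] != x:
--             self.parent[x] = self.find(self.parent[x])
--         return self.parent[x]
--
--     def union(self, x: int, y: int) -> bool:
--         px, py = self.find(x), self.find(y)
--
--         if px == py: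
--             self.history.append(None)
--             return False
--
--         if self.rank[px] < self.rank[py]:
--             px, py = py, px
--
--         self.history.append((py, self.parent[py], self.rank[px]))
--         self.parent[py] = px
--
--         if self.rank[px] == self.rank[py]:
--             self.rank[px] += 1
--
--         self.components -= 1
--         return True
--
--     def undo_union(self):
--         """Undo last union operation"""
--         if not self.history:
--             return
--
--         last_op = self.history.pop()
--
--         if last_op is None:
--             return  # Was a failed union
--
--         py, old_parent, old_rank = last_op
--         self.parent[py] = old_parent
--
--         if old_rank != self.rank[self.parent[py]]:
--             self.rank[self.parent[py]] = old_rank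
--
--         self.components += 1
-- ===== SOURCE B (Python) =====
-- def _enumerate_all_spanning_trees(n, edges):
--     """Enumerate all spanning trees via a component-label array instead of Union-Find."""
--     from itertools import combinations
--
--     all_trees = []
--
--     for edge_combination in combinations(edges, n - 1):
--         comp = list(range(n))
--         weight = 0
--         for u, v, w in edge_combination:
--             cu, cv = comp[u], comp[v]
--             if cu == cv:
--                 break
--             comp = [cu if c == cv else c for c in comp]
--             weight += w
--         else:
--             all_trees.append((weight, list(edge_combination)))
--
--     return all_trees
-- ===== Notes on version B (the rewrite author's own statement) =====
-- stated objective: simpler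
-- what changed: Per combination, B replaces A's rank/path-compression Union-Find class (with history bookkeeping and a final components==1 check) by a flat component-label array that is relabelled on each merge, with the redundant component count dropped.
-- outside the precondition, e.g. on _enumerate_all_spanning_trees(3, [[0, 0, 0], [1, 1, 1], [7, 7, 7]]): A returns [], B returns []
import Mathlib
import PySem

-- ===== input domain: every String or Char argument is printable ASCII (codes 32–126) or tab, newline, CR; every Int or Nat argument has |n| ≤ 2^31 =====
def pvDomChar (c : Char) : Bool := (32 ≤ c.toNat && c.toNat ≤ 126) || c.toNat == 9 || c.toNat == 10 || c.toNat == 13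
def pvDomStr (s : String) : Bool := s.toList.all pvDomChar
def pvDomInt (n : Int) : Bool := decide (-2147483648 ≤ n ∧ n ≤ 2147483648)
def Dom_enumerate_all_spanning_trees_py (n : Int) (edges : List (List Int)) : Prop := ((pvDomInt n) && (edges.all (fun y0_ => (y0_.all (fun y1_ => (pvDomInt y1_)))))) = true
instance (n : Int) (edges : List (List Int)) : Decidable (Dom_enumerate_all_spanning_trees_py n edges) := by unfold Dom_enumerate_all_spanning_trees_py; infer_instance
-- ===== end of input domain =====

-- B replaces A's rank/path-compression Union-Find (with history bookkeeping and a final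
-- component count) by a flat component-label array that is relabelled on each merge; the
-- enumeration over combinations(edges, n-1) is kept.  Objective: simpler.

-- itertools.combinations(l, k) in Python's order (shared library helper of both ports)
def pvCombs {α : Type} : List α → Nat → List (List α)
  | _, 0 => [[]]
  | [], _ + 1 => []
  | x :: xs, k + 1 => (pvCombs xs k).map (fun c => x :: c) ++ pvCombs xs (k + 1)

-- ===== PORT A =====

structure pvUF where
  parent : List Int
  rank : List Int
  components : Int
  history : List (Option (Int × Int × Int))
deriving Repr, DecidableEq

-- UnionFind.find with path compression; the fuel (parent.length + 1) only makes the
-- recursion total — on every input admitted by Pre_ it is enough (proved below).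
def pvFind : Nat → List Int → Int → Option (List Int × Int)
  | 0, _, _ => none
  | fuel + 1, p, x =>
    match PySem.List.pyGet? p x with
    | none => none
    | some px =>
      if px ≠ x then
        match pvFind fuel p px with
        | none => none
        | some (p₁, r) =>
          match PySem.List.pySet? p₁ x r with
          | none => none
          | some p₂ =>
            match PySem.List.pyGet? p₂ x with
            | none => none
            | some res => some (p₂, res)
      else some (p, x)

-- UnionFind.union, step for step (swap by rank, history append, rank bump, components -= 1)
def pvUnion (uf : pvUF) (x y : Int) : Option (pvUF × Bool) :=
  match pvFind (uf.parent.length + 1) uf.parent x with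
  | none => none
  | some (p₁, px) =>
    match pvFind (p₁.length + 1) p₁ y with
    | none => none
    | some (p₂, py) =>
      if px = py then
        some ({ uf with parent := p₂, history := uf.history ++ [none] }, false)
      else
        match PySem.List.pyGet? uf.rank px, PySem.List.pyGet? uf.rank py with
        | some rx, some ry =>
          match (if rx < ry then (py, px) else (px, py)) with
          | (px', py') =>
            match PySem.List.pyGet? p₂ py', PySem.List.pyGet? uf.rank px' with
            | some oldp, some rkx =>
              match PySem.List.pySet? p₂ py' px' with
              | none => none
              | some p₃ =>
                match PySem.List.pyGet? uf.rank py' with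
                | some rky =>
                  match (if rkx = rky then PySem.List.pySet? uf.rank px' (rkx + 1) else some uf.rank) with
                  | none => none
                  | some rank' =>
                    some (⟨p₃, rank', uf.components - 1, uf.history ++ [some (py', oldp, rkx)]⟩, true)
                | none => none
            | _, _ => none
        | _, _ => none

-- the inner `for u, v, w in edge_combination` loop of A (break ⇒ valid = false)
def pvALoop : List (List Int) → pvUF → Int → Option (pvUF × Int × Bool)
  | [], uf, weight => some (uf, weight, true)
  | e :: rest, uf, weight =>
    match e with
    | [u, v, w] =>
      match pvUnion uf u v with
      | none => none
      | some (uf₁, ok) =>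
        if ok then pvALoop rest uf₁ (weight + w) else some (uf₁, weight, false)
    | _ => none

def pvAInit (n : Int) : pvUF :=
  ⟨(List.range n.toNat).map (fun k : Nat => (k : Int)), List.replicate n.toNat 0, n, []⟩

-- the outer `for edge_combination in combinations(edges, n-1)` loop of A
def pvAOuter (n : Int) : List (List (List Int)) → Option (List (Int × List (List Int)))
  | [] => some []
  | comb :: rest =>
    match pvALoop comb (pvAInit n) 0 with
    | none => none
    | some (uf, weight, valid) =>
      match pvAOuter n rest with
      | none => none
      | some tail =>
        if valid && (uf.components == 1) then some ((weight, comb) :: tail) else some tail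

def enumerate_all_spanning_trees_py (n : Int) (edges : List (List Int)) : List (Int × List (List Int)) :=
  if n - 1 < 0 then []   -- Python: combinations(edges, n-1) raises ValueError (outside Pre_)
  else (pvAOuter n (pvCombs edges (n - 1).toNat)).getD []

-- ===== PORT B =====

-- B's inner loop: component labels, relabel cv → cu on each merge; for/else via the Bool
def pvBLoop : List (List Int) → List Int → Int → Option (List Int × Int × Bool)
  | [], comp, weight => some (comp, weight, true)
  | e :: rest, comp, weight =>
    match e with
    | [u, v, w] =>
      match PySem.List.pyGet? comp u, PySem.List.pyGet? comp v with
      | some cu, some cv =>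
        if cu = cv then some (comp, weight, false)
        else pvBLoop rest (comp.map (fun c => if c = cv then cu else c)) (weight + w)
      | _, _ => none
    | _ => none

def pvBOuter (n : Int) : List (List (List Int)) → Option (List (Int × List (List Int)))
  | [] => some []
  | comb :: rest =>
    match pvBLoop comb ((List.range n.toNat).map (fun k : Nat => (k : Int))) 0 with
    | none => none
    | some (_, weight, ok) =>
      match pvBOuter n rest with
      | none => none
      | some tail => if ok then some ((weight, comb) :: tail) else some tail

def enumerate_all_spanning_trees_py_alt (n : Int) (edges : List (List Int)) : List (Int × List (List Int)) :=
  if n - 1 < 0 then []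
  else (pvBOuter n (pvCombs edges (n - 1).toNat)).getD []

-- ===== PRECONDITION & SPEC =====

-- edge [u, v, w] with endpoints that index a length-n list without IndexError
def pvEdgeOK (n : Int) (e : List Int) : Prop :=
  e.length = 3 ∧ -n ≤ e.getD 0 0 ∧ e.getD 0 0 < n ∧ -n ≤ e.getD 1 0 ∧ e.getD 1 0 < n

-- Pre_ excludes n ≤ 0 (A raises ValueError in combinations(edges, n-1)) and, whenever edges can be
-- reached at all (n ≥ 2 and at least one combination of n-1 edges exists), any edge that is not a
-- length-3 triple with endpoints in [-n, n) (A raises ValueError/IndexError when such an edge is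
-- reached; in the rare case that every combination breaks before reaching the bad edge, A returns
-- [] — slightly narrower there, see cites).
def Pre_enumerate_all_spanning_trees_py (n : Int) (edges : List (List Int)) : Prop :=
  1 ≤ n ∧ ((edges.length : Int) < n - 1 ∨ n = 1 ∨ ∀ e ∈ edges, pvEdgeOK n e)

instance (n : Int) (edges : List (List Int)) : Decidable (Pre_enumerate_all_spanning_trees_py n edges) := by
  unfold Pre_enumerate_all_spanning_trees_py pvEdgeOK; infer_instance

def pvWitness_enumerate_all_spanning_trees_py : Int × List (List Int) :=
  (3, [[0, 1, 1], [1, 2, 2], [0, 2, 3]])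

def Spec_enumerate_all_spanning_trees_py (n : Int) (edges : List (List Int)) (out : List (Int × List (List Int))) : Prop := out = enumerate_all_spanning_trees_py_alt n edges
instance (n : Int) (edges : List (List Int)) (out : List (Int × List (List Int))) : Decidable (Spec_enumerate_all_spanning_trees_py n edges out) := by unfold Spec_enumerate_all_spanning_trees_py; infer_instance

-- ===== CLAIM (what is proved, stated in full; the proofs are below) =====
def Claim_equal_enumerate_all_spanning_trees_py : Prop := ∀ (n : Int) (edges : List (List Int)), Dom_enumerate_all_spanning_trees_py n edges → Pre_enumerate_all_spanning_trees_py n edges → Spec_enumerate_all_spanning_trees_py n edges (enumerate_all_spanning_trees_py n edges)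

-- ===== LEMMAS AND PROOFS =====

-- ---- combinations ----

theorem pvCombs_nil (l : List (List Int)) (k : Nat) (h : l.length < k) : pvCombs l k = [] := by
  induction l generalizing k with
  | nil => cases k with | zero => simp at h | succ k => rfl
  | cons x xs ih =>
    cases k with
    | zero => simp at h
    | succ k =>
      have h1 : xs.length < k := by simpa using h
      simp [pvCombs, ih k h1, ih (k+1) (by omega)]

theorem pvCombs_mem {α : Type} (l : List α) (k : Nat) (c : List α) (h : c ∈ pvCombs l k) :
    c.length = k ∧ c.Sublist l := by
  induction l generalizing k c with
  | nil =>
    cases k with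
    | zero => simp [pvCombs] at h; simp [h]
    | succ k => simp [pvCombs] at h
  | cons x xs ih =>
    cases k with
    | zero => simp [pvCombs] at h; simp [h]
    | succ k =>
      simp only [pvCombs, List.mem_append, List.mem_map] at h
      rcases h with ⟨c', hc', rfl⟩ | h
      · obtain ⟨h1, h2⟩ := ih k c' hc'
        exact ⟨by simp [h1], List.Sublist.cons₂ x h2⟩
      · obtain ⟨h1, h2⟩ := ih (k+1) c h
        exact ⟨h1, List.Sublist.cons x h2⟩

-- ---- parent-pointer forests ----

-- Python's normalization of an in-range (possibly negative) index
def pvNorm (N : Nat) (x : Int) : Nat := if 0 ≤ x then x.toNat else N - (-x).toNat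

def pvF (p : List Int) : Nat → Nat := fun i => (p.getD i 0).toNat

def pvChase (f : Nat → Nat) : Nat → Nat → Nat
  | 0, i => i
  | fu + 1, i => if f i = i then i else pvChase f fu (f i)

def pvRoot (p : List Int) (i : Nat) : Nat := pvChase (pvF p) p.length i

-- a strictly-decreasing measure witnesses acyclicity of the parent forest
def pvMeas (N : Nat) (f : Nat → Nat) (d : Nat → Nat) : Prop := ∀ i < N, f i ≠ i → d (f i) < d i

-- the main invariant tying A's parent array to B's component labels
def pvInv (n : Int) (d : Nat → Nat) (p : List Int) (comp : List Int) : Prop :=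
  p.length = n.toNat ∧ comp.length = n.toNat ∧
  (∀ i < n.toNat, 0 ≤ p.getD i 0 ∧ p.getD i 0 < n) ∧
  pvMeas n.toNat (pvF p) d ∧ (∀ i < n.toNat, d i < n.toNat) ∧
  (∀ i < n.toNat, ∀ j < n.toNat, (pvRoot p i = pvRoot p j ↔ comp.getD i 0 = comp.getD j 0))

theorem pvNorm_lt (N : Nat) (x : Int) (h1 : -(N : Int) ≤ x) (h2 : x < N) : pvNorm N x < N := by
  unfold pvNorm
  split_ifs with h
  · omega
  · have h3 : ((-x).toNat : Int) = -x := Int.toNat_of_nonneg (by omega)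
    omega

theorem pvIdx_eq (N : Nat) (x : Int) (h1 : -(N : Int) ≤ x) (h2 : x < N) :
    PySem.List.pyIdx? N x = some (pvNorm N x) := by
  unfold PySem.List.pyIdx? pvNorm
  split_ifs <;> simp_all

theorem pvGet_eq (p : List Int) (x : Int) (h1 : -(p.length : Int) ≤ x) (h2 : x < p.length) :
    PySem.List.pyGet? p x = some (p.getD (pvNorm p.length x) 0) := by
  have h3 := pvIdx_eq p.length x h1 h2
  have h4 := pvNorm_lt p.length x h1 h2
  simp [PySem.List.pyGet?, h3, List.getD_eq_getElem?_getD, List.getElem?_eq_getElem h4]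

theorem pvSet_eq (p : List Int) (x : Int) (v : Int) (h1 : -(p.length : Int) ≤ x) (h2 : x < p.length) :
    PySem.List.pySet? p x v = some (p.set (pvNorm p.length x) v) := by
  have h3 := pvIdx_eq p.length x h1 h2
  simp [PySem.List.pySet?, h3]

-- chase reaches a fixpoint and ignores extra fuel, given a measure
theorem pvChase_fix (N : Nat) (f : Nat → Nat) (d : Nat → Nat)
    (hcl : ∀ i < N, f i < N) (hm : pvMeas N f d) :
    ∀ fuel i, i < N → d i < fuel →
      f (pvChase f fuel i) = pvChase f fuel i ∧ pvChase f fuel i < N := by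
  intro fuel
  induction fuel with
  | zero => intro i _ hd; omega
  | succ fu ih =>
    intro i hi hd
    by_cases hf : f i = i
    · simp [pvChase, hf, hi]
    · have hlt := hm i hi hf
      have := ih (f i) (hcl i hi) (by omega)
      simpa [pvChase, hf] using this

theorem pvChase_fuel (N : Nat) (f : Nat → Nat) (d : Nat → Nat)
    (hcl : ∀ i < N, f i < N) (hm : pvMeas N f d) :
    ∀ fuel fuel' i, i < N → d i < fuel → d i < fuel' →
      pvChase f fuel i = pvChase f fuel' i := by
  intro fuel
  induction fuel with
  | zero => intro fuel' i _ hd; omega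
  | succ fu ih =>
    intro fuel' i hi hd hd'
    cases fuel' with
    | zero => omega
    | succ fu' =>
      by_cases hf : f i = i
      · simp [pvChase, hf]
      · have hlt := hm i hi hf
        simpa [pvChase, hf] using ih fu' (f i) (hcl i hi) (by omega) (by omega)

theorem pvChase_self (f : Nat → Nat) (fuel i : Nat) (h : f i = i) : pvChase f fuel i = i := by
  cases fuel <;> simp [pvChase, h]


-- getD after set, and closure of the parent function
theorem pvGetD_set (p : List Int) (a i : Nat) (v : Int) (ha : a < p.length) :
    (p.set a v).getD i 0 = if i = a then v else p.getD i 0 := by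
  by_cases h : i = a
  · subst h; simp [List.getD_eq_getElem?_getD, ha]
  · simp [List.getD_eq_getElem?_getD, List.getElem?_set_ne (by omega : a ≠ i), h]

theorem pvCl (n : Int) (p : List Int)
    (hrange : ∀ i < n.toNat, 0 ≤ p.getD i 0 ∧ p.getD i 0 < n) :
    ∀ i < n.toNat, pvF p i < n.toNat := by
  intro i hi
  have := hrange i hi
  unfold pvF
  omega

-- ---- facts about pvRoot under the invariant pieces ----

theorem pvRoot_fix (n : Int) (d : Nat → Nat) (p : List Int)
    (hlen : p.length = n.toNat)
    (hm : pvMeas n.toNat (pvF p) d) (hb : ∀ i < n.toNat, d i < n.toNat)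
    (hcl : ∀ i < n.toNat, pvF p i < n.toNat) (i : Nat) (hi : i < n.toNat) :
    pvF p (pvRoot p i) = pvRoot p i ∧ pvRoot p i < n.toNat := by
  have h := pvChase_fix n.toNat (pvF p) d hcl hm n.toNat i hi (hb i hi)
  unfold pvRoot
  rw [hlen]
  exact h

theorem pvRoot_step (n : Int) (d : Nat → Nat) (p : List Int)
    (hlen : p.length = n.toNat)
    (hm : pvMeas n.toNat (pvF p) d) (hb : ∀ i < n.toNat, d i < n.toNat)
    (hcl : ∀ i < n.toNat, pvF p i < n.toNat) (i : Nat) (hi : i < n.toNat) :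
    pvRoot p (pvF p i) = pvRoot p i := by
  by_cases h : pvF p i = i
  · rw [h]
  · have h1 := hm i hi h
    have h2 := hcl i hi
    cases hN : n.toNat with
    | zero => omega
    | succ m =>
      have hd1 : d i < m + 1 := hN ▸ hb i hi
      have hd2 : d (pvF p i) < m := by
        have := hb (pvF p i) (hcl i hi)
        omega
      unfold pvRoot
      rw [hlen, hN]
      have e1 : pvChase (pvF p) (m + 1) i = pvChase (pvF p) m (pvF p i) := by
        simp [pvChase, h]
      rw [e1]
      exact pvChase_fuel n.toNat (pvF p) d hcl hm (m+1) m (pvF p i) (hN ▸ hcl i hi) (by omega) hd2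

theorem pvRoot_self (p : List Int) (i : Nat) (h : pvF p i = i) : pvRoot p i = i := by
  unfold pvRoot
  exact pvChase_self _ _ _ h

theorem pvRoot_idem (n : Int) (d : Nat → Nat) (p : List Int)
    (hlen : p.length = n.toNat)
    (hm : pvMeas n.toNat (pvF p) d) (hb : ∀ i < n.toNat, d i < n.toNat)
    (hcl : ∀ i < n.toNat, pvF p i < n.toNat) (i : Nat) (hi : i < n.toNat) :
    pvRoot p (pvRoot p i) = pvRoot p i := by
  have h := pvRoot_fix n d p hlen hm hb hcl i hi
  exact pvRoot_self p _ h.1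

-- measure decreases down to the root
theorem pvRoot_meas_le (n : Int) (d : Nat → Nat) (p : List Int)
    (hlen : p.length = n.toNat)
    (hm : pvMeas n.toNat (pvF p) d) (hb : ∀ i < n.toNat, d i < n.toNat)
    (hcl : ∀ i < n.toNat, pvF p i < n.toNat) (i : Nat) (hi : i < n.toNat) :
    d (pvRoot p i) ≤ d i := by
  suffices H : ∀ k i, i < n.toNat → d i = k → d (pvRoot p i) ≤ d i by
    exact H (d i) i hi rfl
  intro k
  induction k using Nat.strong_induction_on with
  | _ k IH =>
    intro i hi hk
    by_cases h : pvF p i = i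
    · rw [pvRoot_self p i h]
    · have h1 := hm i hi h
      have h2 := pvRoot_step n d p hlen hm hb hcl i hi
      have h3 := IH (d (pvF p i)) (by omega) (pvF p i) (hcl i hi) rfl
      rw [← h2]
      omega

-- writing p[a] := root(a) (path compression step) changes no root and keeps the measure
theorem pvSetRoot (n : Int) (d : Nat → Nat) (p : List Int)
    (hlen : p.length = n.toNat)
    (hrange : ∀ i < n.toNat, 0 ≤ p.getD i 0 ∧ p.getD i 0 < n)
    (hm : pvMeas n.toNat (pvF p) d) (hb : ∀ i < n.toNat, d i < n.toNat)
    (a : Nat) (ha : a < n.toNat) :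
    (p.set a ((pvRoot p a : Nat) : Int)).length = n.toNat ∧
    (∀ i < n.toNat, 0 ≤ (p.set a ((pvRoot p a : Nat) : Int)).getD i 0 ∧ (p.set a ((pvRoot p a : Nat) : Int)).getD i 0 < n) ∧
    pvMeas n.toNat (pvF (p.set a ((pvRoot p a : Nat) : Int))) d ∧
    (∀ i < n.toNat, pvRoot (p.set a ((pvRoot p a : Nat) : Int)) i = pvRoot p i) := by
  have hcl := pvCl n p hrange
  have hn0 : 0 < n.toNat := by omega
  have hn : (n.toNat : Int) = n := by omega
  have ha' : a < p.length := hlen ▸ ha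
  have hrfix := pvRoot_fix n d p hlen hm hb hcl a ha
  set r := pvRoot p a with hr
  have hget : ∀ i, (p.set a ((r : Nat) : Int)).getD i 0 = if i = a then ((r : Nat) : Int) else p.getD i 0 :=
    fun i => pvGetD_set p a i _ ha'
  have hlen' : (p.set a ((r : Nat) : Int)).length = n.toNat := by simp [hlen]
  have hrange' : ∀ i < n.toNat, 0 ≤ (p.set a ((r : Nat) : Int)).getD i 0 ∧ (p.set a ((r : Nat) : Int)).getD i 0 < n := by
    intro i hi
    rw [hget i]
    split_ifs
    · constructor
      · positivity
      · have := hrfix.2; omega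
    · exact hrange i hi
  have hf' : ∀ i, pvF (p.set a ((r : Nat) : Int)) i = if i = a then r else pvF p i := by
    intro i
    unfold pvF
    rw [hget i]
    split_ifs <;> simp
  have hfa_of : pvF p a = a → r = a := fun h => pvRoot_self p a h
  have hm' : pvMeas n.toNat (pvF (p.set a ((r : Nat) : Int))) d := by
    intro i hi hne
    rw [hf'] at hne ⊢
    by_cases hia : i = a
    · subst hia
      simp only [if_true] at hne ⊢
      have hfa : pvF p i ≠ i := fun h => hne (hfa_of h)
      have h1 := hm i hi hfa
      have h2 := pvRoot_step n d p hlen hm hb hcl i hi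
      have h3 := pvRoot_meas_le n d p hlen hm hb hcl (pvF p i) (hcl i hi)
      rw [h2, ← hr] at h3
      omega
    · simp only [if_neg hia] at hne ⊢
      exact hm i hi hne
  have hcl' := pvCl n _ hrange'
  refine ⟨hlen', hrange', hm', ?_⟩
  suffices H : ∀ k i, i < n.toNat → d i = k → pvRoot (p.set a ((r : Nat) : Int)) i = pvRoot p i by
    intro i hi; exact H (d i) i hi rfl
  intro k
  induction k using Nat.strong_induction_on with
  | _ k IH =>
    intro i hi hk
    by_cases hfi : pvF (p.set a ((r : Nat) : Int)) i = i
    · rw [pvRoot_self _ i hfi]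
      rw [hf'] at hfi
      by_cases hia : i = a
      · subst hia
        rw [if_pos rfl] at hfi
        rw [← hr, ← hfi]
      · rw [if_neg hia] at hfi
        rw [pvRoot_self p i hfi]
    · have hstep' := pvRoot_step n d _ hlen' hm' hb hcl' i hi
      by_cases hia : i = a
      · subst hia
        have hfi' : pvF (p.set i ((r : Nat) : Int)) i = r := by rw [hf', if_pos rfl]
        have hra : r ≠ i := by
          intro h
          apply hfi
          rw [hf', if_pos rfl, h]
        rw [← hstep', hfi']
        have hfr : pvF (p.set i ((r : Nat) : Int)) r = r := by
          rw [hf', if_neg hra]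
          exact hrfix.1
        rw [pvRoot_self _ r hfr]
      · have hfi2 : pvF (p.set a ((r : Nat) : Int)) i = pvF p i := by rw [hf', if_neg hia]
        rw [hfi2] at hfi
        have h1 := hm i hi hfi
        have h2 := IH (d (pvF p i)) (by omega) (pvF p i) (hcl i hi) rfl
        rw [← hstep', hfi2, h2]
        exact pvRoot_step n d p hlen hm hb hcl i hi

-- an unbounded measure can be replaced by one bounded by N (pigeonhole on the chain)
theorem pvNormalize (N : Nat) (f : Nat → Nat) (hcl : ∀ i < N, f i < N)
    (hex : ∃ d, pvMeas N f d) : ∃ d, pvMeas N f d ∧ ∀ i < N, d i < N := by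
  obtain ⟨d, hd⟩ := hex
  have hiter : ∀ i, i < N → ∀ k, f^[k] i < N := by
    intro i hi k
    induction k with
    | zero => simpa
    | succ k ih => rw [Function.iterate_succ_apply']; exact hcl _ ih
  have hfix : ∀ i, i < N → ∃ L, f (f^[L] i) = f^[L] i := by
    intro i hi
    by_contra hno
    push Not at hno
    have hdec : ∀ k, d (f^[k+1] i) < d (f^[k] i) := fun k => by
      rw [Function.iterate_succ_apply']
      exact hd _ (hiter i hi k) (hno k)
    have hsum : ∀ k, d (f^[k] i) + k ≤ d i := by
      intro k
      induction k with
      | zero => simp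
      | succ k ih => have := hdec k; omega
    have := hsum (d i + 1)
    omega
  refine ⟨fun i => @dite _ (∃ L, f (f^[L] i) = f^[L] i) (Classical.propDecidable _)
    (fun h => Nat.find h) (fun _ => 0), ?_, ?_⟩
  · intro i hi hne
    have hi2 := hfix i hi
    have hj2 : ∃ L, f (f^[L] (f i)) = f^[L] (f i) := by
      obtain ⟨L, hL⟩ := hi2
      cases L with
      | zero => simp at hL; exact absurd hL hne
      | succ L =>
        refine ⟨L, ?_⟩
        rw [← Function.iterate_succ_apply]
        exact hL
    simp only [dif_pos hi2, dif_pos hj2]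
    have hm := Nat.find_spec hi2
    have h0 : Nat.find hi2 ≠ 0 := by
      intro h
      rw [h] at hm
      simp at hm
      exact hne hm
    have hstep : f (f^[Nat.find hi2 - 1] (f i)) = f^[Nat.find hi2 - 1] (f i) := by
      rw [← Function.iterate_succ_apply, Nat.succ_eq_add_one, Nat.sub_add_cancel (Nat.pos_of_ne_zero h0)]
      exact hm
    have hle : Nat.find hj2 ≤ Nat.find hi2 - 1 := Nat.find_le hstep
    omega
  · intro i hi
    have hi2 := hfix i hi
    simp only [dif_pos hi2]
    by_contra hge
    push Not at hge
    have hnf : ∀ k < Nat.find hi2, f (f^[k] i) ≠ f^[k] i := fun k hk => Nat.find_min hi2 hk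
    have hdec : ∀ k < Nat.find hi2, d (f^[k+1] i) < d (f^[k] i) := by
      intro k hk
      rw [Function.iterate_succ_apply']
      exact hd _ (hiter i hi k) (hnf k hk)
    have hmono : ∀ a b, a < b → b ≤ Nat.find hi2 → d (f^[b] i) < d (f^[a] i) := by
      intro a b hab hbm
      induction b with
      | zero => omega
      | succ b ih =>
        have hb := hdec b (by omega)
        by_cases h : a = b
        · subst h; omega
        · have := ih (by omega) (by omega); omega
    have hinj : Function.Injective (fun k : Fin (Nat.find hi2 + 1) => (⟨f^[k.1] i, hiter i hi k.1⟩ : Fin N)) := by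
      intro a b hab
      simp only [Fin.mk.injEq] at hab
      rcases lt_trichotomy a.1 b.1 with h | h | h
      · have := hmono a.1 b.1 h (by omega)
        rw [hab] at this
        omega
      · exact Fin.ext h
      · have := hmono b.1 a.1 h (by omega)
        rw [hab] at this
        omega
    have hcard := Fintype.card_le_of_injective _ hinj
    simp only [Fintype.card_fin] at hcard
    omega

-- linking root ry under root rx: the two classes merge, everything else unchanged
theorem pvSetLink (n : Int) (d : Nat → Nat) (p : List Int)
    (hlen : p.length = n.toNat)
    (hrange : ∀ i < n.toNat, 0 ≤ p.getD i 0 ∧ p.getD i 0 < n)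
    (hm : pvMeas n.toNat (pvF p) d) (hb : ∀ i < n.toNat, d i < n.toNat)
    (rx ry : Nat) (hrx : rx < n.toNat) (hry : ry < n.toNat)
    (hfx : pvF p rx = rx) (hfy : pvF p ry = ry) (hne : rx ≠ ry) :
    (p.set ry ((rx : Nat) : Int)).length = n.toNat ∧
    (∀ i < n.toNat, 0 ≤ (p.set ry ((rx : Nat) : Int)).getD i 0 ∧ (p.set ry ((rx : Nat) : Int)).getD i 0 < n) ∧
    (∃ d', pvMeas n.toNat (pvF (p.set ry ((rx : Nat) : Int))) d' ∧ ∀ i < n.toNat, d' i < n.toNat) ∧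
    (∀ i < n.toNat, pvRoot (p.set ry ((rx : Nat) : Int)) i = if pvRoot p i = ry then rx else pvRoot p i) := by
  have hcl := pvCl n p hrange
  have hn0 : 0 < n.toNat := by omega
  have hry' : ry < p.length := hlen ▸ hry
  have hget : ∀ i, (p.set ry ((rx : Nat) : Int)).getD i 0 = if i = ry then ((rx : Nat) : Int) else p.getD i 0 :=
    fun i => pvGetD_set p ry i _ hry'
  have hlen' : (p.set ry ((rx : Nat) : Int)).length = n.toNat := by simp [hlen]
  have hrange' : ∀ i < n.toNat, 0 ≤ (p.set ry ((rx : Nat) : Int)).getD i 0 ∧ (p.set ry ((rx : Nat) : Int)).getD i 0 < n := by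
    intro i hi
    rw [hget i]
    split_ifs
    · constructor
      · positivity
      · omega
    · exact hrange i hi
  have hf' : ∀ i, pvF (p.set ry ((rx : Nat) : Int)) i = if i = ry then rx else pvF p i := by
    intro i
    unfold pvF
    rw [hget i]
    split_ifs <;> simp
  have hcl' := pvCl n _ hrange'
  have hrootx : pvRoot p rx = rx := pvRoot_self p rx hfx
  have hrooty : pvRoot p ry = ry := pvRoot_self p ry hfy
  -- an (unbounded) measure for the linked forest
  have hm1 : ∃ d', pvMeas n.toNat (pvF (p.set ry ((rx : Nat) : Int))) d' := by
    refine ⟨fun i => if pvRoot p i = ry then d i + (Finset.sup (Finset.range n.toNat) d) + 1 else d i, ?_⟩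
    intro i hi hne
    dsimp only
    rw [hf'] at hne ⊢
    by_cases hiy : i = ry
    · rw [if_pos hiy] at hne ⊢
      have hne2 : rx ≠ ry := hiy ▸ hne
      rw [if_neg (by rw [hrootx]; exact hne2), hiy, if_pos hrooty]
      have hsup : d rx ≤ Finset.sup (Finset.range n.toNat) d :=
        Finset.le_sup (Finset.mem_range.mpr hrx)
      omega
    · rw [if_neg hiy] at hne ⊢
      have hstep := pvRoot_step n d p hlen hm hb hcl i hi
      rw [hstep]
      have := hm i hi hne
      split_ifs <;> omega
  have hm2 := pvNormalize n.toNat (pvF (p.set ry ((rx : Nat) : Int))) hcl' hm1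
  obtain ⟨d₂, hd₂, hb₂⟩ := hm2
  refine ⟨hlen', hrange', ⟨d₂, hd₂, hb₂⟩, ?_⟩
  suffices H : ∀ k i, i < n.toNat → d₂ i = k → pvRoot (p.set ry ((rx : Nat) : Int)) i = if pvRoot p i = ry then rx else pvRoot p i by
    intro i hi; exact H (d₂ i) i hi rfl
  intro k
  induction k using Nat.strong_induction_on with
  | _ k IH =>
    intro i hi hk
    by_cases hfi : pvF (p.set ry ((rx : Nat) : Int)) i = i
    · rw [pvRoot_self _ i hfi]
      rw [hf'] at hfi
      by_cases hiy : i = ry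
      · rw [if_pos hiy] at hfi
        exact absurd (hiy ▸ hfi) hne
      · rw [if_neg hiy] at hfi
        rw [pvRoot_self p i hfi, if_neg hiy]
    · have hstep' := pvRoot_step n d₂ _ hlen' hd₂ hb₂ hcl' i hi
      rw [← hstep']
      by_cases hiy : i = ry
      · rw [hiy]
        have hfi' : pvF (p.set ry ((rx : Nat) : Int)) ry = rx := by rw [hf', if_pos rfl]
        rw [hfi']
        have hfrx : pvF (p.set ry ((rx : Nat) : Int)) rx = rx := by
          rw [hf', if_neg hne]
          exact hfx
        rw [pvRoot_self _ rx hfrx, hrooty, if_pos rfl]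
      · have hfi2 : pvF (p.set ry ((rx : Nat) : Int)) i = pvF p i := by rw [hf', if_neg hiy]
        rw [hfi2]
        have hd2lt : d₂ (pvF (p.set ry ((rx : Nat) : Int)) i) < d₂ i := hd₂ i hi hfi
        rw [hfi2] at hd2lt
        have h2 := IH (d₂ (pvF p i)) (by omega) (pvF p i) (hcl i hi) rfl
        rw [h2, pvRoot_step n d p hlen hm hb hcl i hi]


theorem pvNorm_natCast (N a : Nat) : pvNorm N ((a : Nat) : Int) = a := by
  unfold pvNorm
  simp

-- pvFind on a nonnegative in-range index, by strong induction on the measure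
theorem pvFind_nonneg (n : Int) (d : Nat → Nat) (p : List Int)
    (hlen : p.length = n.toNat)
    (hrange : ∀ i < n.toNat, 0 ≤ p.getD i 0 ∧ p.getD i 0 < n)
    (hm : pvMeas n.toNat (pvF p) d) (hb : ∀ i < n.toNat, d i < n.toNat) :
    ∀ k a fuel, a < n.toNat → d a = k → d a < fuel →
    ∃ p', pvFind fuel p ((a : Nat) : Int) = some (p', ((pvRoot p a : Nat) : Int)) ∧
      p'.length = n.toNat ∧ (∀ i < n.toNat, 0 ≤ p'.getD i 0 ∧ p'.getD i 0 < n) ∧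
      pvMeas n.toNat (pvF p') d ∧ (∀ i < n.toNat, pvRoot p' i = pvRoot p i) := by
  have hcl := pvCl n p hrange
  intro k
  induction k using Nat.strong_induction_on with
  | _ k IH =>
    intro a fuel ha hk hfuel
    cases fuel with
    | zero => omega
    | succ fu =>
      have hax1 : -(p.length : Int) ≤ ((a : Nat) : Int) := by omega
      have hax2 : ((a : Nat) : Int) < p.length := by omega
      have hget := pvGet_eq p ((a : Nat) : Int) hax1 hax2
      rw [pvNorm_natCast] at hget
      have hpx := hrange a ha
      by_cases hfa : pvF p a = a
      · have hpxa : p.getD a 0 = ((a : Nat) : Int) := by unfold pvF at hfa; omega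
        refine ⟨p, ?_, hlen, hrange, hm, fun i _ => rfl⟩
        rw [pvRoot_self p a hfa]
        simp only [pvFind, hget]
        rw [if_neg (not_not_intro hpxa)]
      · have hpxa : p.getD a 0 ≠ ((a : Nat) : Int) := by unfold pvF at hfa; omega
        have hflt := hcl a ha
        have hdlt := hm a ha hfa
        obtain ⟨p₁, heq1, hlen1, hrange1, hm1, hroots1⟩ :=
          IH (d (pvF p a)) (by omega) (pvF p a) fu hflt rfl (by omega)
        have hcast : ((pvF p a : Nat) : Int) = p.getD a 0 := by unfold pvF; omega
        rw [hcast] at heq1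
        have hstep := pvRoot_step n d p hlen hm hb hcl a ha
        have hroota : pvRoot p₁ a = pvRoot p a := hroots1 a ha
        have hset := pvSet_eq p₁ ((a : Nat) : Int) ((pvRoot p (pvF p a) : Nat) : Int)
          (by omega) (by omega)
        rw [pvNorm_natCast] at hset
        have hsr := pvSetRoot n d p₁ hlen1 hrange1 hm1 hb a (by omega)
        have hrw : pvRoot p₁ a = pvRoot p (pvF p a) := by rw [hroota, hstep]
        rw [hrw] at hsr
        obtain ⟨hlen2, hrange2, hm2, hroots2⟩ := hsr
        refine ⟨p₁.set a ((pvRoot p (pvF p a) : Nat) : Int), ?_, hlen2, hrange2, hm2, ?_⟩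
        · have hread : (p₁.set a ((pvRoot p (pvF p a) : Nat) : Int)).getD a 0 =
              ((pvRoot p (pvF p a) : Nat) : Int) := by
            rw [pvGetD_set p₁ a a _ (by omega), if_pos rfl]
          have hget2 := pvGet_eq (p₁.set a ((pvRoot p (pvF p a) : Nat) : Int)) ((a : Nat) : Int)
            (by simp only [List.length_set]; omega) (by simp only [List.length_set]; omega)
          rw [pvNorm_natCast, hread] at hget2
          simp only [pvFind, hget]
          rw [if_pos hpxa]
          simp only [heq1, hset, hget2]
          rw [hstep]
        · intro i hi
          rw [hroots2 i hi, hroots1 i hi]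

-- pvFind succeeds with fuel length+1 and returns the root, compressing paths only
theorem pvFind_spec (n : Int) (d : Nat → Nat) (p : List Int)
    (hlen : p.length = n.toNat)
    (hrange : ∀ i < n.toNat, 0 ≤ p.getD i 0 ∧ p.getD i 0 < n)
    (hm : pvMeas n.toNat (pvF p) d) (hb : ∀ i < n.toNat, d i < n.toNat)
    (x : Int) (hx1 : -n ≤ x) (hx2 : x < n) :
    ∃ p', pvFind (p.length + 1) p x = some (p', ((pvRoot p (pvNorm n.toNat x) : Nat) : Int)) ∧
      p'.length = n.toNat ∧
      (∀ i < n.toNat, 0 ≤ p'.getD i 0 ∧ p'.getD i 0 < n) ∧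
      pvMeas n.toNat (pvF p') d ∧
      (∀ i < n.toNat, pvRoot p' i = pvRoot p i) := by
  have hcl := pvCl n p hrange
  by_cases hx : 0 ≤ x
  · have hxa : x = ((x.toNat : Nat) : Int) := by omega
    have hna : pvNorm n.toNat x = x.toNat := by unfold pvNorm; rw [if_pos hx]
    have h1 : x.toNat < n.toNat := by omega
    obtain ⟨p', h⟩ := pvFind_nonneg n d p hlen hrange hm hb (d x.toNat) x.toNat
      (p.length + 1) h1 rfl (by have := hb x.toNat h1; omega)
    refine ⟨p', ?_⟩
    have hxa' : ((x.toNat : Nat) : Int) = x := Int.toNat_of_nonneg hx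
    rw [hxa'] at h
    rw [hna]
    exact h
  · -- negative index: one unpacked step, then the nonnegative case
    push Not at hx
    set a := pvNorm n.toNat x with hadef
    have ha : a < n.toNat := by
      have := pvNorm_lt n.toNat x (by omega) (by omega)
      omega
    have hget := pvGet_eq p x (by omega) (by omega)
    rw [hlen] at hget
    rw [← hadef] at hget
    have hpx := hrange a ha
    have hpxa : p.getD a 0 ≠ x := by omega
    have hflt := hcl a ha
    obtain ⟨p₁, heq1, hlen1, hrange1, hm1, hroots1⟩ :=
      pvFind_nonneg n d p hlen hrange hm hb (d (pvF p a)) (pvF p a) p.length hflt rfl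
        (by have := hb (pvF p a) hflt; omega)
    have hcast : ((pvF p a : Nat) : Int) = p.getD a 0 := by unfold pvF; omega
    rw [hcast] at heq1
    have hstep := pvRoot_step n d p hlen hm hb hcl a ha
    have hroota : pvRoot p₁ a = pvRoot p a := hroots1 a ha
    have hset := pvSet_eq p₁ x ((pvRoot p (pvF p a) : Nat) : Int) (by omega) (by omega)
    have hna : pvNorm p₁.length x = a := by rw [hlen1]
    rw [hna] at hset
    have hsr := pvSetRoot n d p₁ hlen1 hrange1 hm1 hb a ha
    have hrw : pvRoot p₁ a = pvRoot p (pvF p a) := by rw [hroota, hstep]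
    rw [hrw] at hsr
    obtain ⟨hlen2, hrange2, hm2, hroots2⟩ := hsr
    refine ⟨p₁.set a ((pvRoot p (pvF p a) : Nat) : Int), ?_, hlen2, hrange2, hm2, ?_⟩
    · have hread : (p₁.set a ((pvRoot p (pvF p a) : Nat) : Int)).getD a 0 =
          ((pvRoot p (pvF p a) : Nat) : Int) := by
        rw [pvGetD_set p₁ a a _ (by omega), if_pos rfl]
      have hget2 := pvGet_eq (p₁.set a ((pvRoot p (pvF p a) : Nat) : Int)) x
        (by simp only [List.length_set]; omega) (by simp only [List.length_set]; omega)
      have hna2 : pvNorm (p₁.set a ((pvRoot p (pvF p a) : Nat) : Int)).length x = a := by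
        rw [List.length_set, hlen1]
      rw [hna2, hread] at hget2
      simp only [pvFind, hget]
      rw [if_pos hpxa]
      simp only [heq1, hset, hget2]
      rw [hstep]
    · intro i hi
      rw [hroots2 i hi, hroots1 i hi]


theorem pvGetD_map_if (comp : List Int) (cu cv : Int) (i : Nat) (hi : i < comp.length) :
    (comp.map (fun cc => if cc = cv then cu else cc)).getD i 0 =
      (if comp.getD i 0 = cv then cu else comp.getD i 0) := by
  simp [List.getD_eq_getElem?_getD, hi]

theorem pvStar_merge (N : Nat) (root : Nat → Nat) (cmp : Nat → Int)
    (hstar : ∀ i < N, ∀ j < N, (root i = root j ↔ cmp i = cmp j))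
    (nu nv : Nat) (hnu : nu < N) (hnv : nv < N)
    (hne : root nu ≠ root nv)
    (RX RY : Nat) (hxy : (RX = root nu ∧ RY = root nv) ∨ (RX = root nv ∧ RY = root nu)) :
    ∀ i, i < N → ∀ j, j < N →
      (((if root i = RY then RX else root i) = (if root j = RY then RX else root j)) ↔
      ((if cmp i = cmp nv then cmp nu else cmp i) = (if cmp j = cmp nv then cmp nu else cmp j))) := by
  intro i hi j hj
  have Eij := hstar i hi j hj
  have Eui := hstar i hi nu hnu
  have Evi := hstar i hi nv hnv
  have Euj := hstar j hj nu hnu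
  have Evj := hstar j hj nv hnv
  have Euv := hstar nu hnu nv hnv
  rcases hxy with ⟨hx, hy⟩ | ⟨hx, hy⟩ <;> subst hx <;> subst hy <;>
    split_ifs with h1 h2 <;>
    constructor <;> intro h <;> simp_all

-- one union step of A next to one relabel step of B
theorem pvUnion_spec (n : Int) (d : Nat → Nat) (p comp rank : List Int) (c : Int)
    (hist : List (Option (Int × Int × Int)))
    (hinv : pvInv n d p comp) (hrk : rank.length = n.toNat)
    (u v : Int) (hu1 : -n ≤ u) (hu2 : u < n) (hv1 : -n ≤ v) (hv2 : v < n) :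
    ∃ uf' b, pvUnion ⟨p, rank, c, hist⟩ u v = some (uf', b) ∧
      uf'.rank.length = n.toNat ∧
      (b = false →
        uf'.components = c ∧ ∃ d₂, pvInv n d₂ uf'.parent comp) ∧
      (b = true →
        uf'.components = c - 1 ∧
        ∃ d₂, pvInv n d₂ uf'.parent
          (comp.map (fun cc => if cc = comp.getD (pvNorm n.toNat v) 0 then comp.getD (pvNorm n.toNat u) 0 else cc))) ∧
      (b = (!(comp.getD (pvNorm n.toNat u) 0 == comp.getD (pvNorm n.toNat v) 0))) := by
  obtain ⟨hlen, hclen, hrange, hm, hb, hstar⟩ := hinv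
  have hcl := pvCl n p hrange
  have hn0 : 0 < n := by omega
  have hnu : pvNorm n.toNat u < n.toNat := pvNorm_lt n.toNat u (by omega) (by omega)
  have hnv : pvNorm n.toNat v < n.toNat := pvNorm_lt n.toNat v (by omega) (by omega)
  obtain ⟨p₁, heqF1, hlen1, hrange1, hm1, hroots1⟩ :=
    pvFind_spec n d p hlen hrange hm hb u hu1 hu2
  obtain ⟨p₂, heqF2, hlen2, hrange2, hm2, hroots2⟩ :=
    pvFind_spec n d p₁ hlen1 hrange1 hm1 hb v (by omega) (by omega)
  rw [hroots1 (pvNorm n.toNat v) hnv] at heqF2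
  have hroots2' : ∀ i, i < n.toNat → pvRoot p₂ i = pvRoot p i := by
    intro i hi
    rw [hroots2 i hi, hroots1 i hi]
  set RU := pvRoot p (pvNorm n.toNat u) with hRU
  set RV := pvRoot p (pvNorm n.toNat v) with hRV
  have hRUlt : RU < n.toNat := (pvRoot_fix n d p hlen hm hb hcl _ hnu).2
  have hRVlt : RV < n.toNat := (pvRoot_fix n d p hlen hm hb hcl _ hnv).2
  have hstar_uv := hstar (pvNorm n.toNat u) hnu (pvNorm n.toNat v) hnv
  by_cases hru : RU = RV
  · -- roots equal: failed union
    have hb_eq : ((RU : Nat) : Int) = ((RV : Nat) : Int) := by exact_mod_cast hru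
    refine ⟨⟨p₂, rank, c, hist ++ [none]⟩, false, ?_, hrk, ?_, ?_, ?_⟩
    · simp only [pvUnion, heqF1, heqF2]
      rw [if_pos hb_eq]
    · intro _
      refine ⟨rfl, d, hlen2, hclen, hrange2, hm2, hb, ?_⟩
      intro i hi j hj
      rw [hroots2' i hi, hroots2' j hj]
      exact hstar i hi j hj
    · intro h; exact absurd h (by simp)
    · have h := hstar_uv.mp hru
      rw [h]
      simp
  · -- roots differ: link
    have hb_ne : ((RU : Nat) : Int) ≠ ((RV : Nat) : Int) := by exact_mod_cast hru
    have hgetRU := pvGet_eq rank ((RU : Nat) : Int) (by omega) (by omega)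
    rw [pvNorm_natCast] at hgetRU
    have hgetRV := pvGet_eq rank ((RV : Nat) : Int) (by omega) (by omega)
    rw [pvNorm_natCast] at hgetRV
    have hcc : comp.getD (pvNorm n.toNat u) 0 ≠ comp.getD (pvNorm n.toNat v) 0 := by
      intro h; exact hru (hstar_uv.mpr h)
    have hfixRU : pvF p₂ RU = RU := by
      have h1 : pvRoot p RU = RU := by rw [hRU]; exact pvRoot_idem n d p hlen hm hb hcl _ hnu
      have h2 : pvRoot p₂ RU = RU := by rw [hroots2' RU hRUlt, h1]
      have h3 := pvRoot_fix n d p₂ hlen2 hm2 hb (pvCl n p₂ hrange2) RU hRUlt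
      rw [h2] at h3
      exact h3.1
    have hfixRV : pvF p₂ RV = RV := by
      have h1 : pvRoot p RV = RV := by rw [hRV]; exact pvRoot_idem n d p hlen hm hb hcl _ hnv
      have h2 : pvRoot p₂ RV = RV := by rw [hroots2' RV hRVlt, h1]
      have h3 := pvRoot_fix n d p₂ hlen2 hm2 hb (pvCl n p₂ hrange2) RV hRVlt
      rw [h2] at h3
      exact h3.1
    -- the two swap branches
    by_cases hrank : rank.getD RU 0 < rank.getD RV 0
    · -- swap: new root is RV, RU is linked under it
      have hsetp := pvSet_eq p₂ ((RU : Nat) : Int) ((RV : Nat) : Int) (by omega) (by omega)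
      rw [pvNorm_natCast] at hsetp
      have hgetp2 := pvGet_eq p₂ ((RU : Nat) : Int) (by omega) (by omega)
      rw [pvNorm_natCast] at hgetp2
      obtain ⟨hlen3, hrange3, ⟨d₂, hd₂, hb₂⟩, hroots3⟩ :=
        pvSetLink n d p₂ hlen2 hrange2 hm2 hb RV RU hRVlt hRUlt hfixRV hfixRU (Ne.symm hru)
      have hroots3' : ∀ i, i < n.toNat →
          pvRoot (p₂.set RU ((RV : Nat) : Int)) i = if pvRoot p i = RU then RV else pvRoot p i := by
        intro i hi
        rw [hroots3 i hi, hroots2' i hi]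
      refine ⟨⟨p₂.set RU ((RV : Nat) : Int),
        (if rank.getD RV 0 = rank.getD RU 0 then rank.set RV (rank.getD RV 0 + 1) else rank),
        c - 1, hist ++ [some (((RU : Nat) : Int), p₂.getD RU 0, rank.getD RV 0)]⟩, true, ?_, ?_, ?_, ?_, ?_⟩
      · simp only [pvUnion, heqF1, heqF2]
        rw [if_neg hb_ne]
        simp only [hgetRU, hgetRV]
        rw [if_pos hrank]
        simp only [hgetp2, hsetp, hgetRU, hgetRV]
        by_cases hrq : rank.getD RV 0 = rank.getD RU 0
        · have hsetr := pvSet_eq rank ((RV : Nat) : Int) (rank.getD RV 0 + 1) (by omega) (by omega)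
          rw [pvNorm_natCast] at hsetr
          simp only [hsetr, if_pos hrq]
        · simp only [if_neg hrq]
      · split_ifs <;> simp [hrk]
      · intro h; exact absurd h (by simp)
      · intro _
        refine ⟨rfl, d₂, hlen3, by simp [hclen], hrange3, hd₂, hb₂, ?_⟩
        intro i hi j hj
        rw [hroots3' i hi, hroots3' j hj]
        have hmap : ∀ m, m < n.toNat →
            (comp.map (fun cc => if cc = comp.getD (pvNorm n.toNat v) 0 then comp.getD (pvNorm n.toNat u) 0 else cc)).getD m 0 =
            (if comp.getD m 0 = comp.getD (pvNorm n.toNat v) 0 then comp.getD (pvNorm n.toNat u) 0 else comp.getD m 0) := by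
          intro m hm
          exact pvGetD_map_if comp _ _ m (by omega)
        rw [hmap i hi, hmap j hj]
        exact pvStar_merge n.toNat (pvRoot p) (fun m => comp.getD m 0) hstar
          (pvNorm n.toNat u) (pvNorm n.toNat v) hnu hnv hru
          RV RU (Or.inr ⟨rfl, rfl⟩) i hi j hj
      · simp only [List.getD_eq_getElem?_getD] at hcc
        simp [hcc]
    · -- no swap: new root is RU, RV is linked under it
      have hsetp := pvSet_eq p₂ ((RV : Nat) : Int) ((RU : Nat) : Int) (by omega) (by omega)
      rw [pvNorm_natCast] at hsetp
      have hgetp2 := pvGet_eq p₂ ((RV : Nat) : Int) (by omega) (by omega)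
      rw [pvNorm_natCast] at hgetp2
      obtain ⟨hlen3, hrange3, ⟨d₂, hd₂, hb₂⟩, hroots3⟩ :=
        pvSetLink n d p₂ hlen2 hrange2 hm2 hb RU RV hRUlt hRVlt hfixRU hfixRV hru
      have hroots3' : ∀ i, i < n.toNat →
          pvRoot (p₂.set RV ((RU : Nat) : Int)) i = if pvRoot p i = RV then RU else pvRoot p i := by
        intro i hi
        rw [hroots3 i hi, hroots2' i hi]
      refine ⟨⟨p₂.set RV ((RU : Nat) : Int),
        (if rank.getD RU 0 = rank.getD RV 0 then rank.set RU (rank.getD RU 0 + 1) else rank),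
        c - 1, hist ++ [some (((RV : Nat) : Int), p₂.getD RV 0, rank.getD RU 0)]⟩, true, ?_, ?_, ?_, ?_, ?_⟩
      · simp only [pvUnion, heqF1, heqF2]
        rw [if_neg hb_ne]
        simp only [hgetRU, hgetRV]
        rw [if_neg hrank]
        simp only [hgetp2, hsetp, hgetRU, hgetRV]
        by_cases hrq : rank.getD RU 0 = rank.getD RV 0
        · have hsetr := pvSet_eq rank ((RU : Nat) : Int) (rank.getD RU 0 + 1) (by omega) (by omega)
          rw [pvNorm_natCast] at hsetr
          simp only [hsetr, if_pos hrq]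
        · simp only [if_neg hrq]
      · split_ifs <;> simp [hrk]
      · intro h; exact absurd h (by simp)
      · intro _
        refine ⟨rfl, d₂, hlen3, by simp [hclen], hrange3, hd₂, hb₂, ?_⟩
        intro i hi j hj
        rw [hroots3' i hi, hroots3' j hj]
        have hmap : ∀ m, m < n.toNat →
            (comp.map (fun cc => if cc = comp.getD (pvNorm n.toNat v) 0 then comp.getD (pvNorm n.toNat u) 0 else cc)).getD m 0 =
            (if comp.getD m 0 = comp.getD (pvNorm n.toNat v) 0 then comp.getD (pvNorm n.toNat u) 0 else comp.getD m 0) := by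
          intro m hm
          exact pvGetD_map_if comp _ _ m (by omega)
        rw [hmap i hi, hmap j hj]
        exact pvStar_merge n.toNat (pvRoot p) (fun m => comp.getD m 0) hstar
          (pvNorm n.toNat u) (pvNorm n.toNat v) hnu hnv hru
          RU RV (Or.inl ⟨rfl, rfl⟩) i hi j hj
      · simp only [List.getD_eq_getElem?_getD] at hcc
        simp [hcc]

-- the two inner loops agree step for step
theorem pvLoop_spec (n : Int) (comb : List (List Int)) :
    ∀ (d : Nat → Nat) (p comp rank : List Int) (c weight : Int)
      (hist : List (Option (Int × Int × Int))),
      (∀ e ∈ comb, pvEdgeOK n e) → pvInv n d p comp → rank.length = n.toNat →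
      ∃ uf' w' b comp', pvALoop comb ⟨p, rank, c, hist⟩ weight = some (uf', w', b) ∧
        pvBLoop comb comp weight = some (comp', w', b) ∧
        (b = true → uf'.components = c - comb.length) := by
  induction comb with
  | nil =>
    intro d p comp rank c weight hist hwf hinv hrk
    exact ⟨⟨p, rank, c, hist⟩, weight, true, comp, rfl, rfl, by intro _; simp⟩
  | cons e rest IH =>
    intro d p comp rank c weight hist hwf hinv hrk
    have hclen : comp.length = n.toNat := hinv.2.1
    obtain ⟨hel, hb1, hb2, hb3, hb4⟩ := hwf e (List.mem_cons_self)
    obtain ⟨u, v, w, rfl⟩ := List.length_eq_three.mp hel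
    simp only [List.getD] at hb1 hb2 hb3 hb4
    have hu1 : -n ≤ u := by simpa using hb1
    have hu2 : u < n := by simpa using hb2
    have hv1 : -n ≤ v := by simpa using hb3
    have hv2 : v < n := by simpa using hb4
    obtain ⟨uf₁, b, hequ, hrk1, hbf, hbt, hbval⟩ :=
      pvUnion_spec n d p comp rank c hist hinv hrk u v hu1 hu2 hv1 hv2
    have hn0 : 0 < n := by omega
    have hgcu := pvGet_eq comp u (by omega) (by omega)
    have hgcv := pvGet_eq comp v (by omega) (by omega)
    rw [hclen] at hgcu hgcv
    by_cases hcuv : comp.getD (pvNorm n.toNat u) 0 = comp.getD (pvNorm n.toNat v) 0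
    · have hbfalse : b = false := by rw [hbval, beq_iff_eq.mpr hcuv]; rfl
      subst hbfalse
      obtain ⟨hcomp, _⟩ := hbf rfl
      refine ⟨uf₁, weight, false, comp, ?_, ?_, by intro h; exact absurd h (by simp)⟩
      · simp only [pvALoop, hequ]
        rfl
      · simp only [pvBLoop, hgcu, hgcv]
        rw [if_pos (by simp only [List.getD_eq_getElem?_getD] at hcuv; exact hcuv)]
    · have hbtrue : b = true := by rw [hbval, beq_eq_false_iff_ne.mpr hcuv]; rfl
      subst hbtrue
      obtain ⟨hcomp1, d₂, hinv₂⟩ := hbt rfl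
      obtain ⟨uf₂, w₂, b₂, comp₂, hA2, hB2, hcomp2⟩ :=
        IH d₂ uf₁.parent _ uf₁.rank uf₁.components (weight + w) uf₁.history
          (fun e he => hwf e (List.mem_cons_of_mem _ he)) hinv₂ hrk1
      refine ⟨uf₂, w₂, b₂, comp₂, ?_, ?_, ?_⟩
      · simp only [pvALoop, hequ]
        simp only [if_true]
        exact hA2
      · simp only [pvBLoop, hgcu, hgcv]
        rw [if_neg (by simp only [List.getD_eq_getElem?_getD] at hcuv; exact hcuv)]
        exact hB2
      · intro hb2
        have := hcomp2 hb2
        rw [this, hcomp1]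
        simp
        omega

-- initial state invariant
theorem pvInit_inv (n : Int) (h : 1 ≤ n) :
    pvInv n (fun _ => 0) ((List.range n.toNat).map (fun k : Nat => (k : Int)))
      ((List.range n.toNat).map (fun k : Nat => (k : Int))) := by
  have hg : ∀ i, i < n.toNat → ((List.range n.toNat).map (fun k : Nat => (k : Int))).getD i 0 = (i : Int) :=
    fun i hi => PySem.List.getD_map_range (fun j => (j : Int)) n.toNat i 0 hi
  have hf : ∀ i, i < n.toNat → pvF ((List.range n.toNat).map (fun k : Nat => (k : Int))) i = i := by
    intro i hi
    unfold pvF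
    rw [hg i hi]
    simp
  refine ⟨by simp, by simp, ?_, ?_, ?_, ?_⟩
  · intro i hi
    rw [hg i hi]
    constructor
    · positivity
    · omega
  · intro i hi hne
    exact absurd (hf i hi) hne
  · intro i hi
    show 0 < n.toNat
    omega
  · intro i hi j hj
    rw [pvRoot_self _ i (hf i hi), pvRoot_self _ j (hf j hj), hg i hi, hg j hj]
    exact ⟨fun h => by exact_mod_cast h, fun h => by exact_mod_cast h⟩

-- the outer loops agree
theorem pvOuter_spec (n : Int) (h : 1 ≤ n) (combos : List (List (List Int)))
    (hc : ∀ comb ∈ combos, comb.length = (n - 1).toNat ∧ ∀ e ∈ comb, pvEdgeOK n e) :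
    pvAOuter n combos = pvBOuter n combos := by
  induction combos with
  | nil => rfl
  | cons comb rest IH =>
    obtain ⟨hlenc, hwf⟩ := hc comb List.mem_cons_self
    obtain ⟨uf', w', b, comp', hA, hB, hcomp⟩ :=
      pvLoop_spec n comb (fun _ => 0) ((List.range n.toNat).map (fun k : Nat => (k : Int)))
        ((List.range n.toNat).map (fun k : Nat => (k : Int))) (List.replicate n.toNat 0) n 0 []
        hwf (pvInit_inv n h) (by simp)
    have hIH := IH (fun comb hm => hc comb (List.mem_cons_of_mem _ hm))
    simp only [pvAOuter, pvBOuter, pvAInit]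
    rw [hA, hB, hIH]
    cases hres : pvBOuter n rest with
    | none => rfl
    | some tail =>
      cases b with
      | false => rfl
      | true =>
        have hc1 : uf'.components = 1 := by
          rw [hcomp rfl, hlenc]
          have hcast : (((n - 1).toNat : Nat) : Int) = n - 1 := by omega
          rw [hcast]
          ring
        simp [hc1]

-- ===== VERDICT (by name: the statement is the Claim_ definition above) =====
theorem enumerate_all_spanning_trees_py_spec : Claim_equal_enumerate_all_spanning_trees_py := by
  intro n edges _ hpre
  obtain ⟨hn, hor⟩ := hpre
  unfold Spec_enumerate_all_spanning_trees_py
  unfold enumerate_all_spanning_trees_py enumerate_all_spanning_trees_py_alt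
  rw [if_neg (by omega : ¬ n - 1 < 0), if_neg (by omega : ¬ n - 1 < 0)]
  rcases hor with hlt | h1 | hwf
  · have hsz : edges.length < (n - 1).toNat := by omega
    rw [pvCombs_nil edges _ hsz]
    rfl
  · have hz : (n - 1).toNat = 0 := by omega
    have hc : ∀ comb ∈ pvCombs edges (n - 1).toNat, comb.length = (n - 1).toNat ∧ ∀ e ∈ comb, pvEdgeOK n e := by
      intro comb hcm
      rw [hz] at hcm
      simp [pvCombs] at hcm
      subst hcm
      exact ⟨by simp [hz], by simp⟩
    rw [pvOuter_spec n hn _ hc]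
  · have hc : ∀ comb ∈ pvCombs edges (n - 1).toNat, comb.length = (n - 1).toNat ∧ ∀ e ∈ comb, pvEdgeOK n e := by
      intro comb hcm
      obtain ⟨hl, hs⟩ := pvCombs_mem edges _ comb hcm
      exact ⟨hl, fun e he => hwf e (hs.subset he)⟩
    rw [pvOuter_spec n hn _ hc]
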